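-- pv_equiv track=rewrite | github.com/ZhaoZeyu1995/Waterfall | utils/post_process_decode.py | process_quote
-- ===== SOURCE A (Python) =====
-- def process_quote(lc):
--     if "QUOTE" not in lc:
--         return lc
--     else:
--         flag = 0
--         for idx, item in enumerate(lc):
--             if item == 'QUOTE':
--                 if flag == 0:
--                     flag = 1
--                     lc[idx] = '"QUOTE'
--                 elif flag == 1:
--                     flag = 0
--                     lc[idx] = '"UNQUOTE'
--         return lc
-- ===== SOURCE B (Python) =====
-- def process_quote(lc):
--     # Two-pass: collect QUOTE positions, then alternate-label them in place.
--     quote_positions = [i for i, item in enumerate(lc) if item == 'QUOTE']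
--     for n, idx in enumerate(quote_positions):
--         lc[idx] = '"QUOTE' if n % 2 == 0 else '"UNQUOTE'
--     return lc
-- ===== Notes on version B (the rewrite author's own statement) =====
-- stated objective: simpler
-- what changed: Replaces the guarded single pass with a mutable flag by two passes: first collect the indices of all 'QUOTE' tokens, then relabel each by the parity of its rank; the membership guard and the flag state machine disappear.
import Mathlib
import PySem

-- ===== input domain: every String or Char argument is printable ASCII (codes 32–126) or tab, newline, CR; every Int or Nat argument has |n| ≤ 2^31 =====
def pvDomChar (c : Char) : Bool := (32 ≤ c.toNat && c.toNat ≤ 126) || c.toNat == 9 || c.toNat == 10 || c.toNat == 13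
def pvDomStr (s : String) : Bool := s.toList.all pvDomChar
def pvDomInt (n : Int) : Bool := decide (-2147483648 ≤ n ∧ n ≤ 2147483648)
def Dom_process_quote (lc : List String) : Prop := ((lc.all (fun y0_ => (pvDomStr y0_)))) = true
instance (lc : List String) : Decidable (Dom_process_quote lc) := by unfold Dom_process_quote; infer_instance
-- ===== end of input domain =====

-- B replaces A's flag state machine by two passes (collect QUOTE indices, then label by rank parity): simpler decomposition, same cost.
-- Both Pythons mutate lc in place and return it; the equivalence proved here is about the return value.

-- ===== PORT A =====
-- single pass over enumerate(lc) carrying (flag, list), writing lc[idx] via pySetD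
def process_quote (lc : List String) : List String :=
  if "QUOTE" ∉ lc then lc
  else
    ((PySem.List.enumerate lc 0).foldl
      (fun (st : Int × List String) p =>
        if p.2 = "QUOTE" then
          if st.1 = 0 then (1, PySem.List.pySetD st.2 p.1 "\"QUOTE")
          else if st.1 = 1 then (0, PySem.List.pySetD st.2 p.1 "\"UNQUOTE")
          else st
        else st)
      ((0 : Int), lc)).2

-- ===== PORT B =====
def process_quote_alt (lc : List String) : List String :=
  let quote_positions := (PySem.List.enumerate lc 0).filterMap
    (fun p => if p.2 = "QUOTE" then some p.1 else none)
  (PySem.List.enumerate quote_positions 0).foldl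
    (fun acc p => PySem.List.pySetD acc p.2
      (if PySem.Int.mod p.1 2 = 0 then "\"QUOTE" else "\"UNQUOTE"))
    lc

-- ===== PRECONDITION & SPEC =====
def Spec_process_quote (lc : List String) (out : List String) : Prop := out = process_quote_alt lc
instance (lc : List String) (out : List String) : Decidable (Spec_process_quote lc out) := by unfold Spec_process_quote; infer_instance

-- ===== CLAIM (what is proved, stated in full; the proofs are below) =====
def Claim_equal_process_quote : Prop := ∀ (lc : List String), Dom_process_quote lc → Spec_process_quote lc (process_quote lc)

-- ===== LEMMAS AND PROOFS =====

theorem set_append_len (pre : List String) (x v : String) (xs : List String) :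
    (pre ++ x :: xs).set pre.length v = pre ++ v :: xs := by
  induction pre with
  | nil => simp
  | cons a t ih => simp [ih]

theorem pySetD_mid (pre : List String) (x v : String) (xs : List String) :
    PySem.List.pySetD (pre ++ x :: xs) (pre.length : Int) v = pre ++ v :: xs := by
  rw [PySem.List.pySetD_natCast, set_append_len]

-- the core invariant: A's fold from flag f over the tail equals B's fold over the
-- enumerated quote positions of the tail, whenever f matches the parity of B's counter n0
theorem core (xs : List String) : ∀ (pre : List String) (n0 f : Int),
    0 ≤ n0 → f = (if PySem.Int.mod n0 2 = 0 then 0 else 1) →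
    ((PySem.List.enumerate xs (pre.length : Int)).foldl
      (fun (st : Int × List String) p =>
        if p.2 = "QUOTE" then
          if st.1 = 0 then (1, PySem.List.pySetD st.2 p.1 "\"QUOTE")
          else if st.1 = 1 then (0, PySem.List.pySetD st.2 p.1 "\"UNQUOTE")
          else st
        else st)
      (f, pre ++ xs)).2
    =
    (PySem.List.enumerate
        ((PySem.List.enumerate xs (pre.length : Int)).filterMap
          (fun p => if p.2 = "QUOTE" then some p.1 else none)) n0).foldl
      (fun acc p => PySem.List.pySetD acc p.2
        (if PySem.Int.mod p.1 2 = 0 then "\"QUOTE" else "\"UNQUOTE"))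
      (pre ++ xs) := by
  induction xs with
  | nil => intro pre n0 f _ _; simp [PySem.List.enumerate_nil]
  | cons x t ih =>
    intro pre n0 f hn0 hf
    rw [PySem.List.enumerate_cons]
    by_cases hx : x = "QUOTE"
    · subst hx
      have hmod : PySem.Int.mod n0 2 = 0 ∨ PySem.Int.mod n0 2 = 1 := by
        have h1 := PySem.Int.mod_nonneg (a := n0) (b := 2) (by omega)
        have h2 := PySem.Int.mod_lt (a := n0) (b := 2) (by omega)
        omega
      have hpar : (if PySem.Int.mod (n0 + 1) 2 = 0 then (0 : Int) else 1)
          = if PySem.Int.mod n0 2 = 0 then 1 else 0 := by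
        have e0 := PySem.Int.mod_eq_emod_of_pos (a := n0) (b := 2) (by omega)
        have e1 := PySem.Int.mod_eq_emod_of_pos (a := n0 + 1) (b := 2) (by omega)
        rw [e0, e1]; omega
      rcases hmod with h | h
      · have hset : PySem.List.pySetD (pre ++ "QUOTE" :: t) (pre.length : Int)
            "\"QUOTE" = pre ++ "\"QUOTE" :: t := pySetD_mid _ _ _ _
        have key := ih (pre ++ ["\"QUOTE"]) (n0 + 1)
          (if PySem.Int.mod (n0 + 1) 2 = 0 then 0 else 1) (by omega) rfl
        have hlen : ((pre ++ ["\"QUOTE"]).length : Int) = (pre.length : Int) + 1 := by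
          simp
        rw [hlen, hpar] at key
        simp only [h, if_true] at key hpar
        simp only [List.append_assoc, List.singleton_append] at key
        simp only [List.filterMap_cons, if_true, List.foldl_cons,
          PySem.List.enumerate_cons, hf, h, hset]
        exact key
      · have hne : PySem.Int.mod n0 2 ≠ 0 := by omega
        have hset : PySem.List.pySetD (pre ++ "QUOTE" :: t) (pre.length : Int)
            "\"UNQUOTE" = pre ++ "\"UNQUOTE" :: t := pySetD_mid _ _ _ _
        have key := ih (pre ++ ["\"UNQUOTE"]) (n0 + 1)
          (if PySem.Int.mod (n0 + 1) 2 = 0 then 0 else 1) (by omega) rfl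
        have hlen : ((pre ++ ["\"UNQUOTE"]).length : Int) = (pre.length : Int) + 1 := by
          simp
        rw [hlen, hpar] at key
        simp only [hne, if_false] at key hpar
        simp only [List.append_assoc, List.singleton_append] at key
        simp only [List.filterMap_cons, if_true, List.foldl_cons,
          PySem.List.enumerate_cons, hf, hne, if_false, hset]
        exact key
    · have key := ih (pre ++ [x]) n0 f hn0 hf
      have hlen : ((pre ++ [x]).length : Int) = (pre.length : Int) + 1 := by
        simp
      rw [hlen] at key
      simp only [List.append_assoc, List.singleton_append] at key
      simp only [List.filterMap_cons, hx, if_false, List.foldl_cons]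
      exact key

-- ===== VERDICT (by name: the statement is the Claim_ definition above) =====
theorem process_quote_spec : Claim_equal_process_quote := by
  intro lc _
  unfold Spec_process_quote process_quote process_quote_alt
  have h := core lc [] 0 0 le_rfl (by simp [PySem.Int.mod])
  simp only [List.length_nil, Nat.cast_zero, List.nil_append] at h
  by_cases hq : "QUOTE" ∈ lc
  · simp only [hq, not_true, if_false]
    exact h
  · simp only [hq, not_false_iff, if_true]
    have : (PySem.List.enumerate lc 0).filterMap
        (fun p => if p.2 = "QUOTE" then some p.1 else none) = [] := by
      rw [List.filterMap_eq_nil_iff]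
      intro p hp
      have := (PySem.List.mem_enumerate_iff _ _ _).mp hp
      obtain ⟨k, hk, rfl⟩ := this
      have : lc[k] ∈ lc := List.getElem_mem hk
      simp only [ite_eq_right_iff]
      intro he; exact absurd (he ▸ this) hq
    simp [this, PySem.List.enumerate_nil]
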